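-- pv_equiv track=rewrite | github.com/mizhgun/HTResearch | HTResearch/Test/Mocks/utility_scrapers.py | _count_parent_tags
-- ===== SOURCE A (Python) =====
-- def _count_parent_tags(tag_list):
--     parent_counter = 0
--     for i, t in enumerate(tag_list):
--         if '/' not in t:
--             parent_counter += 1
--         else:
--             parent_counter -= 1
--     return parent_counter
-- ===== SOURCE B (Python) =====
-- def _count_parent_tags(tag_list):
--     tags = list(tag_list)
--
--     def net(lo, hi):
--         if hi - lo == 0:
--             return 0
--         if hi - lo == 1:
--             return -1 if '/' in tags[lo] else 1
--         mid = (lo + hi) // 2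
--         return net(lo, mid) + net(mid, hi)
--
--     return net(0, len(tags))
-- ===== Notes on version B (the rewrite author's own statement) =====
-- stated objective: alternative
-- what changed: Replaces A's linear +1/-1 accumulator loop with a divide-and-conquer recursion: the list is split in half, each half's net count is computed recursively, and the two results are summed (correct because the per-tag contributions are independent and addition is associative).
import Mathlib
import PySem

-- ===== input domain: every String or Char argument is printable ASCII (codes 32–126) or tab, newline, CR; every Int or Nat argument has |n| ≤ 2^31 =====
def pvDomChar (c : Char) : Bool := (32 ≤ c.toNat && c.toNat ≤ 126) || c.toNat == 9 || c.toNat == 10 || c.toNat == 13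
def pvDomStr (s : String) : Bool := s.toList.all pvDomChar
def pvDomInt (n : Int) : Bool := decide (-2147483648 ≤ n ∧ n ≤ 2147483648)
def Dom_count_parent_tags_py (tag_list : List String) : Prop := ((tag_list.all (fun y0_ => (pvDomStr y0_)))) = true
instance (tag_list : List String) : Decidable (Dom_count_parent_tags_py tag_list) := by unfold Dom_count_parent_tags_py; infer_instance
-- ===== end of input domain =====

-- B replaces A's linear +1/-1 accumulator loop with a divide-and-conquer recursion over index ranges (alternative decomposition, same cost).


-- ===== PORT A =====
def count_parent_tags_py (tag_list : List String) : Int :=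
  (PySem.List.enumerate tag_list 0).foldl
    (fun parent_counter it =>
      if ¬ (PySem.Str.isIn "/" it.2) then parent_counter + 1 else parent_counter - 1)
    0

-- ===== PORT B =====
-- net tags lo hi: B's inner recursive `net`; indices are Nat (0 ≤ lo ≤ hi in every call).
-- tags[lo] is ported via pyGet?; the `none` branch (out of range, unreachable since lo < len
-- in every call B makes) returns 0 only to make the function total.
def pvNet (tags : List String) (lo hi : Nat) : Int :=
  if hi - lo = 0 then 0
  else if hi - lo = 1 then
    match PySem.List.pyGet? tags (lo : Int) with
    | some t => if PySem.Str.isIn "/" t then -1 else 1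
    | none => 0
  else
    pvNet tags lo ((lo + hi) / 2) + pvNet tags ((lo + hi) / 2) hi
termination_by hi - lo
decreasing_by all_goals omega

def count_parent_tags_py_alt (tag_list : List String) : Int :=
  let tags := tag_list
  pvNet tags 0 tags.length

-- ===== PRECONDITION & SPEC =====
def Spec_count_parent_tags_py (tag_list : List String) (out : Int) : Prop := out = count_parent_tags_py_alt tag_list
instance (tag_list : List String) (out : Int) : Decidable (Spec_count_parent_tags_py tag_list out) := by unfold Spec_count_parent_tags_py; infer_instance

-- ===== CLAIM (what is proved, stated in full; the proofs are below) =====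
def Claim_equal_count_parent_tags_py : Prop := ∀ (tag_list : List String), Dom_count_parent_tags_py tag_list → Spec_count_parent_tags_py tag_list (count_parent_tags_py tag_list)

-- ===== LEMMAS AND PROOFS =====
-- the per-tag contribution
def pvSign (t : String) : Int := if PySem.Str.isIn "/" t then -1 else 1

-- prefix sums of pvSign
def pvPrefix (tags : List String) (n : Nat) : Int := ((tags.take n).map pvSign).sum

lemma pvPrefix_succ (tags : List String) (n : Nat) (h : n < tags.length) :
    pvPrefix tags (n + 1) = pvPrefix tags n + pvSign tags[n] := by
  unfold pvPrefix
  rw [List.take_add_one, List.getElem?_eq_getElem h, List.map_append, List.sum_append]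
  simp

lemma pvNet_eq_prefix (tags : List String) (lo hi : Nat)
    (hle : lo ≤ hi) (hhi : hi ≤ tags.length) :
    pvNet tags lo hi = pvPrefix tags hi - pvPrefix tags lo := by
  induction hn : hi - lo using Nat.strong_induction_on generalizing lo hi with
  | _ n ih =>
    rw [pvNet]
    by_cases h0 : hi - lo = 0
    · have : hi = lo := by omega
      simp [this]
    · by_cases h1 : hi - lo = 1
      · have hlo : lo < tags.length := by omega
        have hhi' : hi = lo + 1 := by omega
        simp only [h1, if_true]
        rw [PySem.List.pyGet?_natCast, List.getElem?_eq_getElem hlo]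
        rw [hhi', pvPrefix_succ tags lo hlo]
        unfold pvSign
        by_cases hs : PySem.Str.isIn "/" tags[lo] = true <;> simp [hs]
      · simp only [h0, if_false, h1, if_false]
        have hm1 : lo ≤ (lo + hi) / 2 := by omega
        have hm2 : (lo + hi) / 2 ≤ hi := by omega
        rw [ih ((lo + hi) / 2 - lo) (by omega) lo _ hm1 (by omega) rfl,
            ih (hi - (lo + hi) / 2) (by omega) _ hi hm2 hhi rfl]
        ring

lemma pvFoldA (tags : List String) (n : Int) (acc : Int) :
    (PySem.List.enumerate tags n).foldl
      (fun parent_counter it =>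
        if ¬ (PySem.Str.isIn "/" it.2) then parent_counter + 1 else parent_counter - 1)
      acc
    = acc + (tags.map pvSign).sum := by
  induction tags generalizing n acc with
  | nil => simp [PySem.List.enumerate_nil]
  | cons h t ih =>
    rw [PySem.List.enumerate_cons, List.foldl_cons, ih]
    unfold pvSign
    by_cases hs : PySem.Chars.isIn ['/'] h.toList = true <;>
      simp [PySem.Str.isIn, hs] <;> ring

-- ===== VERDICT (by name: the statement is the Claim_ definition above) =====
theorem count_parent_tags_py_spec : Claim_equal_count_parent_tags_py := by
  intro tag_list _
  unfold Spec_count_parent_tags_py count_parent_tags_py count_parent_tags_py_alt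
  rw [pvFoldA, pvNet_eq_prefix tag_list 0 tag_list.length (Nat.zero_le _) le_rfl]
  simp [pvPrefix]
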